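-- pv_equiv track=rewrite | github.com/ikormushev/PenguinBase | db_components/table.py | check_given_name
-- ===== SOURCE A (Python) =====
-- def check_given_name(name: str) -> bool:
--
--     if len(name) < 3 or len(name) > 64:
--         return False
--
--     allowed_characters = 'abcdefghijklmnopqrstuvwxyzABCDEFGHIJKLMNOPQRSTUVWXYZ_0123456789'
--
--     for char in name:
--         if char not in allowed_characters:
--             return False
--
--     return True
-- ===== SOURCE B (Python) =====
-- import re
--
-- _NAME_RE = re.compile(r'[A-Za-z0-9_]{3,64}')
--
-- def check_given_name(name: str) -> bool:
--     return bool(_NAME_RE.fullmatch(name))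
-- ===== Notes on version B (the rewrite author's own statement) =====
-- stated objective: idiomatic
-- what changed: Replaces the explicit length guard and per-character membership loop over a 63-character alphabet string with a single precompiled regex fullmatch r'[A-Za-z0-9_]{3,64}' whose character class and repetition bounds encode the whole rule.
import Mathlib
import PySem

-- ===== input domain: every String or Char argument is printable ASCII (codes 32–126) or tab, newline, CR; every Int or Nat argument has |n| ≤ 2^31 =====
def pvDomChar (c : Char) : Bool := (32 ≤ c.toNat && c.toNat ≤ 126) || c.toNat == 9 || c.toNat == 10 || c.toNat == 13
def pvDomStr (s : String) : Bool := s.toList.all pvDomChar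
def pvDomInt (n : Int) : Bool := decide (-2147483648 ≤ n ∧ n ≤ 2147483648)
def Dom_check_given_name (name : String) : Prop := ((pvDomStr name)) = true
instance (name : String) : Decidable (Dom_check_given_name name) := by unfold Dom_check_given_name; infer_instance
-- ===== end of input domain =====

-- B replaces A's explicit length guard plus per-character scan of a 63-character alphabet string by a
-- single regex fullmatch r'[A-Za-z0-9_]{3,64}' (ported as its exact semantics: length bounds + character-class test).

-- ===== PORT A =====
def allowedCharsA : List Char := "abcdefghijklmnopqrstuvwxyzABCDEFGHIJKLMNOPQRSTUVWXYZ_0123456789".toList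

-- 'char not in allowed_characters' is Python substring containment; for a 1-character needle it is
-- exactly membership of that character, ported as List.contains.
def checkCharsA : List Char → Bool
  | [] => true
  | c :: rest => if !(allowedCharsA.contains c) then false else checkCharsA rest

def check_given_name (name : String) : Bool :=
  if PySem.Str.len name < 3 ∨ PySem.Str.len name > 64 then false
  else checkCharsA name.toList

-- ===== PORT B =====
-- nameClassChar is the regex character class [A-Za-z0-9_]; fullmatch of [..]{3,64} = length in [3,64] and all chars in the class.
def nameClassChar (c : Char) : Bool :=
  ('A' ≤ c && c ≤ 'Z') || ('a' ≤ c && c ≤ 'z') || ('0' ≤ c && c ≤ '9') || c == '_'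

def check_given_name_alt (name : String) : Bool :=
  (decide (3 ≤ name.toList.length) && decide (name.toList.length ≤ 64)) && name.toList.all nameClassChar

-- ===== PRECONDITION & SPEC =====
def Spec_check_given_name (name : String) (out : Bool) : Prop := out = check_given_name_alt name
instance (name : String) (out : Bool) : Decidable (Spec_check_given_name name out) := by unfold Spec_check_given_name; infer_instance

-- ===== CLAIM (what is proved, stated in full; the proofs are below) =====
def Claim_equal_check_given_name : Prop := ∀ (name : String), Dom_check_given_name name → Spec_check_given_name name (check_given_name name)

-- ===== LEMMAS AND PROOFS =====
set_option maxRecDepth 4000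

-- The 63-character alphabet of A is exactly B's regex character class, for every Char.
theorem mem_allowed (c : Char) : allowedCharsA.contains c = nameClassChar c := by
  have hmap : allowedCharsA.map Char.toNat =
      [97,98,99,100,101,102,103,104,105,106,107,108,109,110,111,112,113,114,115,116,117,118,119,120,121,122,
       65,66,67,68,69,70,71,72,73,74,75,76,77,78,79,80,81,82,83,84,85,86,87,88,89,90,
       95,48,49,50,51,52,53,54,55,56,57] := by decide
  have hinj : Function.Injective Char.toNat := by
    intro a b h
    exact Char.ext (UInt32.toNat_inj.mp h)
  have hmem : allowedCharsA.contains c = ((allowedCharsA.map Char.toNat).contains c.toNat) := by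
    simp [List.mem_map_of_injective hinj]
  rw [hmem, hmap]
  apply Bool.eq_iff_iff.mpr
  simp only [nameClassChar, List.contains_iff_mem, List.mem_cons, List.not_mem_nil, or_false,
    Bool.or_eq_true, Bool.and_eq_true, decide_eq_true_eq, beq_iff_eq, Char.le_def,
    UInt32.le_iff_toNat_le, Char.ext_iff, ← UInt32.toNat_inj]
  have e0 : ('A').val.toNat = 65 := rfl
  have e1 : ('Z').val.toNat = 90 := rfl
  have e2 : ('a').val.toNat = 97 := rfl
  have e3 : ('z').val.toNat = 122 := rfl
  have e4 : ('0').val.toNat = 48 := rfl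
  have e5 : ('9').val.toNat = 57 := rfl
  have e6 : ('_').val.toNat = 95 := rfl
  simp only [e0,e1,e2,e3,e4,e5,e6, show c.toNat = c.val.toNat from rfl]
  omega

-- A's early-return scan is List.all of the membership test.
theorem checkCharsA_eq_all (l : List Char) : checkCharsA l = l.all (allowedCharsA.contains ·) := by
  induction l with
  | nil => rfl
  | cons c rest ih =>
      simp only [checkCharsA, List.all_cons, ih]
      cases allowedCharsA.contains c <;> simp

-- ===== VERDICT (by name: the statement is the Claim_ definition above) =====
theorem check_given_name_spec : Claim_equal_check_given_name := by
  intro name _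
  unfold Spec_check_given_name check_given_name check_given_name_alt
  rw [PySem.Str.len_eq, checkCharsA_eq_all,
    show (fun c => allowedCharsA.contains c) = nameClassChar from funext mem_allowed]
  split_ifs with h
  · rcases h with h | h
    · rw [decide_eq_false (show ¬ (3 ≤ name.toList.length) by omega)]
      simp
    · rw [decide_eq_false (show ¬ (name.toList.length ≤ 64) by omega)]
      simp
  · push Not at h
    rw [decide_eq_true (show 3 ≤ name.toList.length by omega),
        decide_eq_true (show name.toList.length ≤ 64 by omega)]
    simp
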